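-- pv_equiv track=rewrite | github.com/tycyd/codeforces | implementation/1393C Pinkie Pie Eats Patty-cakes.py | pinkie_pie_eas_patty_cakes
-- ===== SOURCE A (Python) =====
-- def pinkie_pie_eas_patty_cakes(n, a_a):
--     dic = {}
--     mx = 0
--
--     for a in a_a:
--         if a not in dic:
--             dic[a] = 0
--         dic[a] += 1
--         mx = max(dic[a], mx)
--
--     cnt = 0
--     for k in dic:
--         if dic[k] == mx:
--             cnt += 1
--
--     res = cnt - 1
--     res += (n - cnt*mx) // (mx - 1)
--
--     return res
-- ===== SOURCE B (Python) =====
-- def pinkie_pie_eas_patty_cakes(n, a_a):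
--     mx = 0
--     cnt = 0
--     run = 0
--     prev = None
--     for x in sorted(a_a):
--         run = run + 1 if x == prev else 1
--         prev = x
--         if run > mx:
--             mx = run
--             cnt = 1
--         elif run == mx:
--             cnt += 1
--     return cnt - 1 + (n - cnt * mx) // (mx - 1)
-- ===== Notes on version B (the rewrite author's own statement) =====
-- stated objective: alternative
-- what changed: Replaces the frequency-dict build plus dict scan with a sort of a copy followed by a single run-length scan that tracks the longest run of equal values and the number of runs achieving it, then applies the same closed-form formula.
import Mathlib
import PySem

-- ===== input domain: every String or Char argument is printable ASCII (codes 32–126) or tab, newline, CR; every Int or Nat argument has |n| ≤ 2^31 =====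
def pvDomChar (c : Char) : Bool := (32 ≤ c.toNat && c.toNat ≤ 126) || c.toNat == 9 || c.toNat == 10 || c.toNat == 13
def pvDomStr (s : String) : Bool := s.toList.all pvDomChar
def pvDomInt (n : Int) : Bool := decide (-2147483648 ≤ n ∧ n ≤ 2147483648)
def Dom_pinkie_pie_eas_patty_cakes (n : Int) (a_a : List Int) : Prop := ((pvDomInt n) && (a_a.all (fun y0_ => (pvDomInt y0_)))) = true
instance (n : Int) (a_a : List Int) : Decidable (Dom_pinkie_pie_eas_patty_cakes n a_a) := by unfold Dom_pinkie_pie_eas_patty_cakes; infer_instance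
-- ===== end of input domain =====

-- B replaces A's frequency-dict pass by a sort of a copy + one run-length scan (a different decomposition of the same task; no speed claim).

-- ===== PORT A =====
def pinkie_pie_eas_patty_cakes (n : Int) (a_a : List Int) : Int :=
  let st := a_a.foldl
    (fun (st : PySem.Dict Int Int × Int) a =>
      let dic := if st.1.contains a then st.1 else st.1.insert a 0
      let dic := dic.insert a (dic.getD a 0 + 1)
      (dic, max (dic.getD a 0) st.2))
    (PySem.Dict.empty, 0)
  let dic := st.1
  let mx := st.2
  let cnt := dic.keys.foldl (fun cnt k => if dic.getD k 0 == mx then cnt + 1 else cnt) (0 : Int)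
  let res := cnt - 1
  let res := res + PySem.Int.floordiv (n - cnt * mx) (mx - 1)
  res

-- ===== PORT B =====
def pinkie_pie_eas_patty_cakes_alt (n : Int) (a_a : List Int) : Int :=
  let st := (PySem.List.sorted a_a (fun x => x) false).foldl
    (fun (st : Option Int × Int × Int × Int) x =>
      let run := if some x == st.1 then st.2.1 + 1 else 1
      let mc : Int × Int :=
        if run > st.2.2.1 then (run, 1)
        else if run == st.2.2.1 then (st.2.2.1, st.2.2.2 + 1)
        else (st.2.2.1, st.2.2.2)
      (some x, run, mc.1, mc.2))
    (none, 0, 0, 0)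
  let mx := st.2.2.1
  let cnt := st.2.2.2
  cnt - 1 + PySem.Int.floordiv (n - cnt * mx) (mx - 1)

-- ===== PRECONDITION & SPEC =====
-- Pre_ excludes exactly the inputs where A raises ZeroDivisionError (mx - 1 = 0):
-- a nonempty list with no duplicate elements, i.e. maximum frequency 1.
def Pre_pinkie_pie_eas_patty_cakes (n : Int) (a_a : List Int) : Prop :=
  a_a = [] ∨ ¬ a_a.Nodup
instance (n : Int) (a_a : List Int) : Decidable (Pre_pinkie_pie_eas_patty_cakes n a_a) := by
  unfold Pre_pinkie_pie_eas_patty_cakes; infer_instance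

def pvWitness_pinkie_pie_eas_patty_cakes : Int × List Int := (4, [1, 1, 2, 2])

def Spec_pinkie_pie_eas_patty_cakes (n : Int) (a_a : List Int) (out : Int) : Prop := out = pinkie_pie_eas_patty_cakes_alt n a_a
instance (n : Int) (a_a : List Int) (out : Int) : Decidable (Spec_pinkie_pie_eas_patty_cakes n a_a out) := by unfold Spec_pinkie_pie_eas_patty_cakes; infer_instance

-- ===== CLAIM (what is proved, stated in full; the proofs are below) =====
def Claim_equal_pinkie_pie_eas_patty_cakes : Prop := ∀ (n : Int) (a_a : List Int), Dom_pinkie_pie_eas_patty_cakes n a_a → Pre_pinkie_pie_eas_patty_cakes n a_a → Spec_pinkie_pie_eas_patty_cakes n a_a (pinkie_pie_eas_patty_cakes n a_a)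

-- ===== LEMMAS AND PROOFS =====

def pvMaxOver (l r : List Int) : Nat := r.foldr (fun x m => max (l.count x) m) 0
def pvM (l : List Int) : Nat := pvMaxOver l l
def pvC (l : List Int) : Nat := (PySem.List.dedup l).countP (fun x => l.count x == pvM l)

theorem pvMaxOver_le (l r : List Int) : ∀ x ∈ r, l.count x ≤ pvMaxOver l r := by
  induction r with
  | nil => simp
  | cons y t ih =>
    intro x hx
    simp only [pvMaxOver, List.foldr] at *
    rcases List.mem_cons.mp hx with h | h
    · subst h; exact le_max_left _ _
    · exact le_trans (ih x h) (le_max_right _ _)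

theorem pvMaxOver_mem (l r : List Int) : pvMaxOver l r = 0 ∨ ∃ x ∈ r, l.count x = pvMaxOver l r := by
  induction r with
  | nil => left; rfl
  | cons y t ih =>
    simp only [pvMaxOver, List.foldr] at *
    rcases Nat.le_total (l.count y) (t.foldr (fun x m => max (l.count x) m) 0) with h | h
    · rcases ih with h0 | ⟨x, hx, he⟩
      · rw [h0] at h ⊢
        rcases Nat.eq_zero_of_le_zero h with h'
        right; exact ⟨y, List.mem_cons_self, by simp [h', h0]⟩
      · right; exact ⟨x, List.mem_cons_of_mem _ hx, by omega⟩
    · right; exact ⟨y, List.mem_cons_self, by omega⟩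

theorem pvM_le (l : List Int) : ∀ x ∈ l, l.count x ≤ pvM l := pvMaxOver_le l l

theorem pvM_mem (l : List Int) (h : l ≠ []) : ∃ x ∈ l, l.count x = pvM l := by
  rcases pvMaxOver_mem l l with h0 | hm
  · rcases List.exists_mem_of_ne_nil l h with ⟨x, hx⟩
    refine ⟨x, hx, ?_⟩
    have h1 := pvM_le l x hx
    have h2 : 0 < l.count x := List.count_pos_iff.mpr hx
    unfold pvM at *; omega
  · exact hm

theorem count_append_singleton (p : List Int) (x y : Int) :
    (p ++ [x]).count y = p.count y + (if y = x then 1 else 0) := by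
  rcases eq_or_ne y x with h | h
  · simp [List.count_append, List.count_singleton, h]
  · simp [List.count_append, List.count_singleton, h, Ne.symm h]

theorem pvM_append_singleton (p : List Int) (x : Int) :
    pvM (p ++ [x]) = max (p.count x + 1) (pvM p) := by
  apply Nat.le_antisymm
  · rcases pvM_mem (p ++ [x]) (by simp) with ⟨y, hy, he⟩
    rw [← he, count_append_singleton]
    rcases eq_or_ne y x with h | h
    · subst h
      rw [if_pos rfl]
      exact le_max_left _ _
    · rw [if_neg h]
      have hyp : y ∈ p := by
        rcases List.mem_append.mp hy with h' | h'
        · exact h'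
        · simp at h'; omega
      have := pvM_le p y hyp
      omega
  · apply max_le
    · have h1 := pvM_le (p ++ [x]) x (by simp)
      rw [count_append_singleton, if_pos rfl] at h1
      omega
    · rcases eq_or_ne p [] with rfl | hp
      · exact Nat.zero_le _
      · rcases pvM_mem p hp with ⟨y, hy, he⟩
        have h1 := pvM_le (p ++ [x]) y (by simp [hy])
        rw [count_append_singleton] at h1
        have : (0:Nat) ≤ if y = x then 1 else 0 := Nat.zero_le _
        omega

theorem pvDedup_append (p : List Int) (x : Int) :
    PySem.List.dedup (p ++ [x]) =
      if x ∈ p then PySem.List.dedup p else PySem.List.dedup p ++ [x] := by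
  simp only [PySem.List.dedup_eq_ofList, PySem.Set.ofList, List.foldl_append, List.foldl_cons,
    List.foldl_nil, PySem.Set.add]
  have hmem : (List.foldl PySem.Set.add PySem.Set.empty p).contains x = true ↔ x ∈ p := by
    rw [PySem.Set.contains, List.contains_iff_mem]
    exact PySem.Set.mem_ofList p x
  by_cases h : x ∈ p
  · rw [if_pos (hmem.mpr h), if_pos h]
  · rw [if_neg (fun hc => h (hmem.mp hc)), if_neg h]

theorem pvCountP_update_true (d : List Int) (x : Int) (pred pred' : Int → Bool)
    (hd : d.Nodup) (hx : x ∈ d) (hpx : pred x = false) (hpx' : pred' x = true)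
    (hsame : ∀ y ∈ d, y ≠ x → pred' y = pred y) :
    d.countP pred' = d.countP pred + 1 := by
  have hperm : d.Perm (x :: d.erase x) := List.perm_cons_erase hx
  have herase : ∀ y ∈ d.erase x, pred' y = pred y := by
    intro y hy
    exact hsame y (List.mem_of_mem_erase hy) (hd.mem_erase_iff.mp hy).1
  rw [hperm.countP_eq pred', hperm.countP_eq pred]
  simp only [List.countP_cons, hpx, hpx', if_true, if_false, Bool.false_eq_true]
  have : (d.erase x).countP pred' = (d.erase x).countP pred :=
    List.countP_congr (fun y hy => by rw [herase y hy])
  omega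

theorem pvC_append_gt (p : List Int) (x : Int) (h : pvM p < p.count x + 1) :
    pvC (p ++ [x]) = 1 := by
  have hM : pvM (p ++ [x]) = p.count x + 1 := by
    rw [pvM_append_singleton]; omega
  have hcx : (p ++ [x]).count x = p.count x + 1 := by
    rw [count_append_singleton, if_pos rfl]
  have hpred : ∀ y ∈ PySem.List.dedup (p ++ [x]),
      ((p ++ [x]).count y == pvM (p ++ [x])) = (y == x) := by
    intro y hy
    rcases eq_or_ne y x with rfl | hyx
    · simp [hcx, hM]
    · have hyp : y ∈ p := by
        have := (PySem.List.mem_dedup _ _).mp hy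
        rcases List.mem_append.mp this with h' | h'
        · exact h'
        · simp at h'; omega
      have h1 := pvM_le p y hyp
      rw [count_append_singleton, if_neg hyx]
      have : ¬ (p.count y = pvM (p ++ [x])) := by omega
      simp [this, hyx]
  unfold pvC
  rw [List.countP_congr (fun y hy => by rw [hpred y hy])]
  rw [← List.count]
  exact List.count_eq_one_of_mem (PySem.List.nodup_dedup _) ((PySem.List.mem_dedup _ _).mpr (by simp))

theorem pvC_append_eq (p : List Int) (x : Int) (h : p.count x + 1 = pvM p) :
    pvC (p ++ [x]) = pvC p + 1 := by
  have hM : pvM (p ++ [x]) = pvM p := by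
    rw [pvM_append_singleton]; omega
  have hcx : (p ++ [x]).count x = p.count x + 1 := by
    rw [count_append_singleton, if_pos rfl]
  have hother : ∀ y, y ≠ x → (p ++ [x]).count y = p.count y := by
    intro y hyx; rw [count_append_singleton, if_neg hyx]; omega
  by_cases hxp : x ∈ p
  · rw [pvC, pvDedup_append, if_pos hxp, hM]
    rw [pvC]
    apply pvCountP_update_true _ x _ _ (PySem.List.nodup_dedup _)
      ((PySem.List.mem_dedup _ _).mpr hxp)
    · have : ¬ (p.count x = pvM p) := by omega
      simp [this]
    · simp [hcx, h]
    · intro y _ hyx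
      rw [hother y hyx]
  · rw [pvC, pvDedup_append, if_neg hxp, hM, List.countP_append]
    have hc0 : p.count x = 0 := List.count_eq_zero.mpr hxp
    have hx1 : ((p ++ [x]).count x == pvM p) = true := by
      simp [hcx, hc0, ← h]
    have : List.countP (fun y => (p ++ [x]).count y == pvM p) [x] = 1 := by
      simp [List.countP_cons, List.countP_nil, hx1]
      omega
    rw [this, pvC]
    congr 1
    apply List.countP_congr
    intro y hy
    have hyx : y ≠ x := by
      intro hcon; subst hcon
      exact hxp ((PySem.List.mem_dedup _ _).mp hy)
    rw [hother y hyx]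

theorem pvC_append_lt (p : List Int) (x : Int) (h : p.count x + 1 < pvM p) :
    pvC (p ++ [x]) = pvC p := by
  have hM : pvM (p ++ [x]) = pvM p := by
    rw [pvM_append_singleton]; omega
  have hcx : (p ++ [x]).count x = p.count x + 1 := by
    rw [count_append_singleton, if_pos rfl]
  have hother : ∀ y, y ≠ x → (p ++ [x]).count y = p.count y := by
    intro y hyx; rw [count_append_singleton, if_neg hyx]; omega
  have hxfalse : ¬ ((p ++ [x]).count x = pvM p) := by omega
  by_cases hxp : x ∈ p
  · rw [pvC, pvDedup_append, if_pos hxp, hM, pvC]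
    apply List.countP_congr
    intro y _
    rcases eq_or_ne y x with rfl | hyx
    · have h2 : ¬ (p.count y = pvM p) := by omega
      have h3 : ¬ (p.count y + 1 = pvM p) := by omega
      simp [hcx, h2, h3]
    · rw [hother y hyx]
  · rw [pvC, pvDedup_append, if_neg hxp, hM, List.countP_append]
    have hx0 : ((p ++ [x]).count x == pvM p) = false := by
      simp [hxfalse]
      omega
    have : List.countP (fun y => (p ++ [x]).count y == pvM p) [x] = 0 := by
      simp [List.countP_cons, List.countP_nil, hx0]
      omega
    rw [this, pvC]
    have : List.countP (fun y => (p ++ [x]).count y == pvM p) (PySem.List.dedup p)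
        = List.countP (fun y => p.count y == pvM p) (PySem.List.dedup p) := by
      apply List.countP_congr
      intro y hy
      have hyx : y ≠ x := by
        intro hcon; subst hcon
        exact hxp ((PySem.List.mem_dedup _ _).mp hy)
      rw [hother y hyx]
    omega

theorem pvM_perm (l l' : List Int) (h : l.Perm l') : pvM l = pvM l' := by
  rcases eq_or_ne l [] with rfl | hl
  · rw [List.Perm.eq_nil (h.symm)]
  · have hl' : l' ≠ [] := fun hc => hl (List.Perm.eq_nil (hc ▸ h))
    apply Nat.le_antisymm
    · rcases pvM_mem l hl with ⟨x, hx, he⟩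
      rw [← he, h.count_eq x]
      exact pvM_le l' x (h.mem_iff.mp hx)
    · rcases pvM_mem l' hl' with ⟨x, hx, he⟩
      rw [← he, ← h.count_eq x]
      exact pvM_le l x (h.mem_iff.mpr hx)

theorem pvC_perm (l l' : List Int) (h : l.Perm l') : pvC l = pvC l' := by
  have hdd : (PySem.List.dedup l).Perm (PySem.List.dedup l') := by
    rw [List.perm_ext_iff_of_nodup (PySem.List.nodup_dedup _) (PySem.List.nodup_dedup _)]
    intro a
    rw [PySem.List.mem_dedup, PySem.List.mem_dedup]
    exact h.mem_iff
  unfold pvC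
  rw [hdd.countP_eq]
  apply List.countP_congr
  intro y _
  rw [h.count_eq y, pvM_perm l l' h]

theorem pvDict_getD_not_contains (d : PySem.Dict Int Int) (a : Int)
    (h : d.contains a = false) : d.getD a 0 = 0 := by
  have := (PySem.Dict.get?_eq_none_iff_contains d a).mpr h
  rw [PySem.Dict.getD, this]
  rfl

theorem pvDict_insert_insert (d : PySem.Dict Int Int) (k : Int) (v w : Int) :
    (d.insert k v).insert k w = d.insert k w := by
  by_cases h : d.contains k = true
  · obtain ⟨p0, hp0, hp0k⟩ := List.any_eq_true.mp (by rw [PySem.Dict.contains] at h; exact h)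
    simp only [PySem.Dict.insert, h, if_true]
    have hc2 : (PySem.Dict.mk (d.items.map (fun p => if (p.1 == k) = true then (k, v) else p))
        : PySem.Dict Int Int).contains k = true := by
      rw [PySem.Dict.contains]
      exact List.any_eq_true.mpr ⟨(k, v), List.mem_map.mpr ⟨p0, hp0, by simp [hp0k]⟩, by simp⟩
    simp only [hc2, if_true]
    congr 1
    rw [List.map_map]
    apply List.map_congr_left
    intro p _
    by_cases hp : (p.1 == k) = true
    · simp only [beq_iff_eq] at hp
      simp [hp]
    · simp only [beq_iff_eq] at hp
      simp [hp]
  · have h' : d.contains k = false := by revert h; cases d.contains k <;> simp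
    have hkeys : ∀ p ∈ d.items, (p.1 == k) = false := by
      intro p hp
      by_contra hcon
      have h2 : (p.1 == k) = true := by revert hcon; cases (p.1 == k) <;> simp
      have h3 : d.contains k = true := by
        rw [PySem.Dict.contains]
        exact List.any_eq_true.mpr ⟨p, hp, h2⟩
      rw [h'] at h3; exact Bool.noConfusion h3
    simp only [PySem.Dict.insert, h', Bool.false_eq_true, if_false]
    have hc2 : (PySem.Dict.mk (d.items ++ [(k, v)]) : PySem.Dict Int Int).contains k = true := by
      rw [PySem.Dict.contains]
      exact List.any_eq_true.mpr ⟨(k, v), by simp, by simp⟩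
    simp only [hc2, if_true]
    congr 1
    rw [List.map_append]
    have hmapid : d.items.map (fun p => if (p.1 == k) = true then (k, w) else p) = d.items := by
      have := List.map_congr_left (l := d.items)
        (f := fun p => if (p.1 == k) = true then (k, w) else p) (g := id)
        (fun p hp => by simp [hkeys p hp])
      simpa using this
    rw [hmapid]
    simp

theorem pvStepA_eq (d : PySem.Dict Int Int) (mx a : Int) :
    (let dic := if d.contains a then d else d.insert a 0
     let dic2 := dic.insert a (dic.getD a 0 + 1)
     ((dic2, max (dic2.getD a 0) mx) : PySem.Dict Int Int × Int))
    = (d.insert a (d.getD a 0 + 1), max (d.getD a 0 + 1) mx) := by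
  by_cases h : d.contains a = true
  · simp only [h, if_true, PySem.Dict.getD_insert_self]
  · have h' : d.contains a = false := by revert h; cases d.contains a <;> simp
    have h0 : d.getD a 0 = 0 := pvDict_getD_not_contains d a h'
    simp only [h', Bool.false_eq_true, if_false, PySem.Dict.getD_insert_self, h0,
      pvDict_insert_insert]

theorem pvAfold (l : List Int) :
    l.foldl
      (fun (st : PySem.Dict Int Int × Int) a =>
        let dic := if st.1.contains a then st.1 else st.1.insert a 0
        let dic := dic.insert a (dic.getD a 0 + 1)
        (dic, max (dic.getD a 0) st.2))
      (PySem.Dict.empty, 0)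
    = (PySem.Dict.counter l, (pvM l : Int)) := by
  induction l using List.reverseRecOn with
  | nil => simp [PySem.Dict.counter, pvM, pvMaxOver]
  | append_singleton p a ih =>
    rw [List.foldl_append, ih, List.foldl_cons, List.foldl_nil]
    have hstep := pvStepA_eq (PySem.Dict.counter p) ((pvM p : Int)) a
    simp only at hstep ⊢
    rw [hstep]
    have h1 : (PySem.Dict.counter p).insert a ((PySem.Dict.counter p).getD a 0 + 1)
        = PySem.Dict.counter (p ++ [a]) := by
      rw [← PySem.Dict.foldl_insert_getD_add_one_eq_counter p,
        ← PySem.Dict.foldl_insert_getD_add_one_eq_counter (p ++ [a]),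
        List.foldl_append, List.foldl_cons, List.foldl_nil]
    rw [h1, PySem.Dict.getD_counter]
    congr 1
    rw [pvM_append_singleton]
    push_cast [Nat.cast_max]
    rfl

theorem pvA_char (n : Int) (a_a : List Int) :
    pinkie_pie_eas_patty_cakes n a_a
      = (pvC a_a : Int) - 1
        + PySem.Int.floordiv (n - (pvC a_a : Int) * (pvM a_a : Int)) ((pvM a_a : Int) - 1) := by
  unfold pinkie_pie_eas_patty_cakes
  rw [pvAfold]
  simp only
  rw [PySem.Dict.keys_counter, ← PySem.List.dedup_eq_ofList]
  rw [PySem.List.foldl_if_add_one (fun k => (PySem.Dict.counter a_a).getD k 0 == (pvM a_a : Int))]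
  have hcnt : List.countP (fun k => (PySem.Dict.counter a_a).getD k 0 == (pvM a_a : Int))
      (PySem.List.dedup a_a) = pvC a_a := by
    unfold pvC
    apply List.countP_congr
    intro y _
    rw [PySem.Dict.getD_counter]
    by_cases hb : a_a.count y = pvM a_a
    · have hb' : (a_a.count y : Int) = (pvM a_a : Int) := by exact_mod_cast hb
      simp [hb, hb']
    · have hb' : ¬ ((a_a.count y : Int) = (pvM a_a : Int)) := by exact_mod_cast hb
      simp [hb, hb']
  rw [hcnt]
  ring_nf

theorem pvLast_max (p : List Int) (hs : p.Pairwise (· ≤ ·)) (L : Int) (hL : p.getLast? = some L) :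
    ∀ y ∈ p, y ≤ L := by
  induction p with
  | nil => simp
  | cons a t ih =>
    rcases List.pairwise_cons.mp hs with ⟨ha, ht⟩
    cases t with
    | nil =>
      simp at hL
      intro y hy
      simp at hy
      omega
    | cons b t' =>
      rw [List.getLast?_cons_cons] at hL
      have hrest := ih ht hL
      intro y hy
      rcases List.mem_cons.mp hy with rfl | hy'
      · exact le_trans (ha b (by simp)) (hrest b (by simp))
      · exact hrest y hy'

def pvRunV (p : List Int) : Int := (p.getLast?.map (fun L => (p.count L : Int))).getD 0

theorem pvBfold (p : List Int) (hs : p.Pairwise (· ≤ ·)) :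
    p.foldl
      (fun (st : Option Int × Int × Int × Int) x =>
        let run := if some x == st.1 then st.2.1 + 1 else 1
        let mc : Int × Int :=
          if run > st.2.2.1 then (run, 1)
          else if run == st.2.2.1 then (st.2.2.1, st.2.2.2 + 1)
          else (st.2.2.1, st.2.2.2)
        (some x, run, mc.1, mc.2))
      (none, 0, 0, 0)
    = (p.getLast?, pvRunV p, (pvM p : Int), (pvC p : Int)) := by
  induction p using List.reverseRecOn with
  | nil => rfl
  | append_singleton p x ih =>
    have hsp : p.Pairwise (· ≤ ·) := (List.pairwise_append.mp hs).1
    have hbound : ∀ y ∈ p, y ≤ x := fun y hy => (List.pairwise_append.mp hs).2.2 y hy x (by simp)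
    rw [List.foldl_append, ih hsp, List.foldl_cons, List.foldl_nil]
    simp only
    have hrun : (if some x == p.getLast? then pvRunV p + 1 else 1) = ((p.count x : Int) + 1) := by
      cases hp : p.getLast? with
      | none =>
        have hnil : p = [] := List.getLast?_eq_none_iff.mp hp
        subst hnil
        simp [pvRunV]
      | some L =>
        by_cases hxL : x = L
        · subst hxL
          rw [if_pos (by simp)]
          simp [pvRunV, hp]
        · rw [if_neg (by simp [hxL])]
          have hxnp : x ∉ p := by
            intro hxp
            have h1 := pvLast_max p hsp L hp x hxp
            have h2 := hbound L (List.mem_of_getLast? hp)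
            omega
          rw [List.count_eq_zero.mpr hxnp]
          simp
    rw [hrun]
    have hlast : (p ++ [x]).getLast? = some x := List.getLast?_concat
    have hrv : pvRunV (p ++ [x]) = ((p.count x : Int) + 1) := by
      simp only [pvRunV, hlast, Option.map_some, Option.getD_some]
      rw [count_append_singleton, if_pos rfl]
      push_cast
      ring
    rcases Nat.lt_trichotomy (pvM p) (p.count x + 1) with hlt | heq | hgt
    · rw [if_pos (by push_cast; omega)]
      simp only
      have hM : pvM (p ++ [x]) = p.count x + 1 := by rw [pvM_append_singleton]; omega
      rw [hlast, hrv, hM, pvC_append_gt p x hlt]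
      push_cast
      ring_nf
    · rw [if_neg (by push_cast; omega), if_pos (beq_iff_eq.mpr (by push_cast; omega))]
      simp only
      have hM : pvM (p ++ [x]) = pvM p := by rw [pvM_append_singleton]; omega
      rw [hlast, hrv, hM, pvC_append_eq p x heq.symm]
      push_cast
      ring_nf
    · rw [if_neg (by push_cast; omega), if_neg (by simp only [beq_iff_eq]; push_cast; omega)]
      simp only
      have hM : pvM (p ++ [x]) = pvM p := by rw [pvM_append_singleton]; omega
      rw [hlast, hrv, hM, pvC_append_lt p x hgt]

theorem pvB_char (n : Int) (a_a : List Int) :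
    pinkie_pie_eas_patty_cakes_alt n a_a
      = (pvC (PySem.List.sorted a_a (fun x => x) false) : Int) - 1
        + PySem.Int.floordiv
            (n - (pvC (PySem.List.sorted a_a (fun x => x) false) : Int)
              * (pvM (PySem.List.sorted a_a (fun x => x) false) : Int))
            ((pvM (PySem.List.sorted a_a (fun x => x) false) : Int) - 1) := by
  unfold pinkie_pie_eas_patty_cakes_alt
  rw [pvBfold _ (by simpa using PySem.List.sorted_pairwise a_a (fun x => x))]

theorem pvMain (n : Int) (a_a : List Int) :
    pinkie_pie_eas_patty_cakes n a_a = pinkie_pie_eas_patty_cakes_alt n a_a := by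
  rw [pvA_char, pvB_char,
    pvC_perm _ _ (PySem.List.sorted_perm a_a (fun x => x) false),
    pvM_perm _ _ (PySem.List.sorted_perm a_a (fun x => x) false)]

-- ===== VERDICT (by name: the statement is the Claim_ definition above) =====
theorem pinkie_pie_eas_patty_cakes_spec : Claim_equal_pinkie_pie_eas_patty_cakes := by
  intro n a_a _ _
  unfold Spec_pinkie_pie_eas_patty_cakes
  exact pvMain n a_a
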